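-- pv_equiv track=rewrite | github.com/Cognitohazard/pyxschem | src/pyxschem/parser.py | _split_logical_lines
-- ===== SOURCE A (Python) =====
-- def _split_logical_lines(text: str) -> list[str]:
--     """Split text into logical lines, joining multiline attribute blocks.
--
--     A line with unbalanced braces is joined with subsequent lines until
--     braces are balanced. Quote state is tracked across joined lines to
--     handle multiline quoted values inside brace blocks.
--     """
--     raw_lines = text.rstrip("\n").split("\n")
--     logical: list[str] = []
--     i = 0
--
--     while i < len(raw_lines):
--         line = raw_lines[i]
--         depth, in_quote = _brace_depth(line, False)
--
--         if depth > 0 or in_quote: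
--             # Unbalanced — accumulate lines until balanced
--             parts = [line]
--             while (depth > 0 or in_quote) and i + 1 < len(raw_lines):
--                 i += 1
--                 parts.append(raw_lines[i])
--                 d, in_quote = _brace_depth(raw_lines[i], in_quote)
--                 depth += d
--             logical.append("\n".join(parts))
--         else:
--             logical.append(line)
--
--         i += 1
--
--     return logical
--
-- def _brace_depth(line: str, in_quote: bool) -> tuple[int, bool]:
--     """Count net brace depth change in a line, tracking quote state.
--
--     Args:
--         line: The line to analyze.
--         in_quote: Whether we're inside a quoted string from a previous line.
--
--     Returns:
--         (depth_change, in_quote_after) — net brace depth and quote state.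
--     """
--     depth = 0
--     for ch in line:
--         if ch == '"':
--             in_quote = not in_quote
--         elif not in_quote:
--             if ch == "{":
--                 depth += 1
--             elif ch == "}":
--                 depth -= 1
--     return depth, in_quote
-- ===== SOURCE B (Python) =====
-- def _split_logical_lines(text: str) -> list[str]:
--     """Single character-level pass: maintain buffer/depth/quote state per
--     logical line; a newline flushes the buffer only when braces are balanced
--     and we are outside quotes."""
--     logical: list[str] = []
--     buf: list[str] = []
--     depth = 0
--     in_quote = False
--     for ch in text.rstrip("\n"):
--         if ch == "\n":
--             if depth > 0 or in_quote:
--                 buf.append(ch)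
--             else:
--                 logical.append("".join(buf))
--                 buf = []
--                 depth = 0
--                 in_quote = False
--         else:
--             buf.append(ch)
--             if ch == '"':
--                 in_quote = not in_quote
--             elif not in_quote:
--                 if ch == "{":
--                     depth += 1
--                 elif ch == "}":
--                     depth -= 1
--     logical.append("".join(buf))
--     return logical
-- ===== Notes on version B (the rewrite author's own statement) =====
-- stated objective: simpler
-- what changed: Replaces A's splitting into raw lines plus a nested re-join loop driven by a per-line _brace_depth helper with a single character-level pass that maintains buffer/depth/quote state and flushes the buffer at balanced newlines.
import Mathlib
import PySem

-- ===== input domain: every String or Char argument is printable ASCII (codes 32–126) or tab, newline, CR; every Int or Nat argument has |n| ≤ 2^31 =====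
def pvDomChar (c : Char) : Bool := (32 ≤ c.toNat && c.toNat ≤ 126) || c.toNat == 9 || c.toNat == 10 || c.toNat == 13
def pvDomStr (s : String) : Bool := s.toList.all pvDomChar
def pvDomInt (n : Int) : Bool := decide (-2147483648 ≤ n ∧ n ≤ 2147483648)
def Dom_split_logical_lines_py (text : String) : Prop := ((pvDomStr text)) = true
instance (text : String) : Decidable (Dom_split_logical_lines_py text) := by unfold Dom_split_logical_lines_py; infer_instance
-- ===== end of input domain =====

-- B replaces A's raw-line split + nested re-join loop by one character-level pass (objective: simpler); return values proved equal on all inputs.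

-- ===== PORT A =====
-- _brace_depth's loop body
def pvBraceStep (s : Int × Bool) (ch : Char) : Int × Bool :=
  if ch = '"' then (s.1, !s.2)
  else if !s.2 then
    (if ch = '{' then (s.1 + 1, s.2) else if ch = '}' then (s.1 - 1, s.2) else s)
  else s

-- _brace_depth(line, in_quote)
def pvBraceDepth (line : List Char) (inq : Bool) : Int × Bool :=
  line.foldl pvBraceStep (0, inq)

-- inner `while` of A: accumulate raw lines while unbalanced; returns the joined
-- logical line and the remaining raw lines
def pvAccA (depth : Int) (inq : Bool) (parts rest : List (List Char)) :
    List Char × List (List Char) :=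
  match rest with
  | [] => (PySem.Chars.join ['\n'] parts, [])
  | l :: rs =>
    if depth > 0 ∨ inq = true then
      pvAccA (depth + (pvBraceDepth l inq).1) (pvBraceDepth l inq).2 (parts ++ [l]) rs
    else (PySem.Chars.join ['\n'] parts, l :: rs)

-- termination fact cited by pvOuterA's decreasing_by
theorem pvAccA_rest_length_le (rest : List (List Char)) :
    ∀ (depth : Int) (inq : Bool) (parts : List (List Char)),
      (pvAccA depth inq parts rest).2.length ≤ rest.length := by
  induction rest with
  | nil => intro d q p; simp [pvAccA]
  | cons l rs ih =>
    intro d q p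
    by_cases h : d > 0 ∨ q = true
    · simp only [pvAccA, if_pos h]
      exact le_trans (ih _ _ _) (Nat.le_succ _)
    · simp only [pvAccA, if_neg h]
      exact le_refl _

-- outer `while` of A
def pvOuterA (lines : List (List Char)) : List (List Char) :=
  match lines with
  | [] => []
  | l :: rs =>
    if (pvBraceDepth l false).1 > 0 ∨ (pvBraceDepth l false).2 = true then
      (pvAccA (pvBraceDepth l false).1 (pvBraceDepth l false).2 [l] rs).1
        :: pvOuterA (pvAccA (pvBraceDepth l false).1 (pvBraceDepth l false).2 [l] rs).2
    else l :: pvOuterA rs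
termination_by lines.length
decreasing_by
  · have := pvAccA_rest_length_le rs (pvBraceDepth l false).1 (pvBraceDepth l false).2 [l]
    simp only [List.length_cons]; omega
  · simp only [List.length_cons]; omega

def split_logical_lines_py (text : String) : List String :=
  -- text.rstrip("\n"): hand port, exact — drops exactly the trailing '\n' characters
  let stripped := (text.toList.reverse.dropWhile (· == '\n')).reverse
  -- .split("\n"): List.splitOn is exact for a single-character separator
  (pvOuterA (stripped.splitOn '\n')).map String.mk

-- ===== PORT B =====
-- loop body of B's single pass
def pvStepB (s : List String × List Char × Int × Bool) (ch : Char) :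
    List String × List Char × Int × Bool :=
  match s with
  | (acc, buf, depth, inq) =>
    if ch = '\n' then
      if depth > 0 ∨ inq = true then (acc, buf ++ [ch], depth, inq)
      else (acc ++ [String.mk buf], [], 0, false)
    else
      if ch = '"' then (acc, buf ++ [ch], depth, !inq)
      else if inq = true then (acc, buf ++ [ch], depth, inq)
      else if ch = '{' then (acc, buf ++ [ch], depth + 1, inq)
      else if ch = '}' then (acc, buf ++ [ch], depth - 1, inq)
      else (acc, buf ++ [ch], depth, inq)

def split_logical_lines_py_alt (text : String) : List String :=
  -- text.rstrip("\n"): hand port, exact — drops exactly the trailing '\n' characters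
  let r := ((text.toList.reverse.dropWhile (· == '\n')).reverse).foldl pvStepB ([], [], 0, false)
  r.1 ++ [String.mk r.2.1]

-- ===== PRECONDITION & SPEC =====
def Spec_split_logical_lines_py (text : String) (out : List String) : Prop := out = split_logical_lines_py_alt text
instance (text : String) (out : List String) : Decidable (Spec_split_logical_lines_py text out) := by unfold Spec_split_logical_lines_py; infer_instance

-- ===== CLAIM (what is proved, stated in full; the proofs are below) =====
def Claim_equal_split_logical_lines_py : Prop := ∀ (text : String), Dom_split_logical_lines_py text → Spec_split_logical_lines_py text (split_logical_lines_py text)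

-- ===== LEMMAS AND PROOFS =====

-- what the accumulation phase appends to the first line, and the leftover raw lines
def pvTail (depth : Int) (inq : Bool) (rest : List (List Char)) :
    List Char × List (List Char) :=
  match rest with
  | [] => ([], [])
  | l :: rs =>
    if depth > 0 ∨ inq = true then
      ('\n' :: l ++ (pvTail (depth + (pvBraceDepth l inq).1) (pvBraceDepth l inq).2 rs).1,
       (pvTail (depth + (pvBraceDepth l inq).1) (pvBraceDepth l inq).2 rs).2)
    else ([], l :: rs)

def pvFinish (s : List String × List Char × Int × Bool) : List String := s.1 ++ [String.mk s.2.1]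

theorem pvBraceStep_shift (d : Int) (q : Bool) (c : Char) :
    pvBraceStep (d, q) c = (d + (pvBraceStep (0, q) c).1, (pvBraceStep (0, q) c).2) := by
  simp only [pvBraceStep]
  split_ifs <;> simp [sub_eq_add_neg]

theorem pvBraceDepth_shift (l : List Char) : ∀ (d : Int) (q : Bool),
    l.foldl pvBraceStep (d, q) = (d + (pvBraceDepth l q).1, (pvBraceDepth l q).2) := by
  induction l with
  | nil => intro d q; simp [pvBraceDepth]
  | cons c l ih =>
    intro d q
    have h1 : pvBraceDepth (c :: l) q = l.foldl pvBraceStep (pvBraceStep (0, q) c) := rfl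
    rw [List.foldl_cons, pvBraceStep_shift d q c, ih]
    conv_rhs => rw [h1, ← Prod.mk.eta (p := pvBraceStep (0, q) c), ih]
    rw [add_assoc]

theorem pvBraceDepth_cons (c : Char) (l : List Char) (q : Bool) :
    pvBraceDepth (c :: l) q
      = ((pvBraceStep (0, q) c).1 + (pvBraceDepth l (pvBraceStep (0, q) c).2).1,
         (pvBraceDepth l (pvBraceStep (0, q) c).2).2) := by
  have h1 : pvBraceDepth (c :: l) q = l.foldl pvBraceStep (pvBraceStep (0, q) c) := rfl
  rw [h1, ← Prod.mk.eta (p := pvBraceStep (0, q) c), pvBraceDepth_shift]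

theorem pvStepB_char (acc : List String) (buf : List Char) (d : Int) (q : Bool)
    (c : Char) (hc : c ≠ '\n') :
    pvStepB (acc, buf, d, q) c
      = (acc, buf ++ [c], (pvBraceStep (d, q) c).1, (pvBraceStep (d, q) c).2) := by
  simp only [pvStepB, pvBraceStep]
  split_ifs <;> simp_all

theorem pvStepB_nl_keep (acc : List String) (buf : List Char) (d : Int) (q : Bool)
    (h : d > 0 ∨ q = true) :
    pvStepB (acc, buf, d, q) '\n' = (acc, buf ++ ['\n'], d, q) := by
  simp [pvStepB, h]

theorem pvStepB_nl_flush (acc : List String) (buf : List Char) (d : Int) (q : Bool)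
    (h : ¬(d > 0 ∨ q = true)) :
    pvStepB (acc, buf, d, q) '\n' = (acc ++ [String.mk buf], [], 0, false) := by
  simp [pvStepB, h]

theorem pvFold_line : ∀ (l : List Char), '\n' ∉ l →
    ∀ (acc : List String) (buf : List Char) (d : Int) (q : Bool),
    l.foldl pvStepB (acc, buf, d, q)
      = (acc, buf ++ l, d + (pvBraceDepth l q).1, (pvBraceDepth l q).2) := by
  intro l
  induction l with
  | nil => intro _ acc buf d q; simp [pvBraceDepth]
  | cons c l ih =>
    intro hl acc buf d q
    have hc : c ≠ '\n' := fun h => hl (by simp [h])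
    have hl' : '\n' ∉ l := fun h => hl (List.mem_cons_of_mem _ h)
    rw [List.foldl_cons, pvStepB_char _ _ _ _ _ hc, pvBraceStep_shift d q c,
        ih hl', pvBraceDepth_cons]
    simp [add_assoc]

theorem pvJoin_append (l : List Char) : ∀ (parts : List (List Char)), parts ≠ [] →
    PySem.Chars.join ['\n'] (parts ++ [l]) = PySem.Chars.join ['\n'] parts ++ '\n' :: l := by
  intro parts
  induction parts with
  | nil => intro h; exact absurd rfl h
  | cons p ps ih =>
    intro _
    cases ps with
    | nil =>
      rw [List.cons_append, List.nil_append, PySem.Chars.join_cons_cons,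
          PySem.Chars.join_singleton, PySem.Chars.join_singleton]
      simp
    | cons p2 ps2 =>
      rw [List.cons_append, List.cons_append, PySem.Chars.join_cons_cons,
          ← List.cons_append, ih (by simp), PySem.Chars.join_cons_cons]
      simp

theorem pvAccA_eq (rest : List (List Char)) : ∀ (d : Int) (q : Bool) (parts : List (List Char)),
    parts ≠ [] →
    pvAccA d q parts rest
      = (PySem.Chars.join ['\n'] parts ++ (pvTail d q rest).1, (pvTail d q rest).2) := by
  induction rest with
  | nil => intro d q parts _; simp [pvAccA, pvTail]
  | cons l rs ih =>
    intro d q parts hp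
    by_cases h : d > 0 ∨ q = true
    · simp only [pvAccA, pvTail, if_pos h]
      rw [ih _ _ _ (by simp), pvJoin_append _ _ hp]
      simp
    · simp only [pvAccA, pvTail, if_neg h]
      simp

-- sep does not occur in any piece of splitOnP
theorem pvSplitOnP_pieces {α : Type} (p : α → Bool) : ∀ (xs : List α),
    ∀ l ∈ xs.splitOnP p, ∀ a ∈ l, p a = false := by
  intro xs
  induction xs with
  | nil =>
    intro l hl a ha
    rw [List.splitOnP_nil] at hl
    simp at hl
    subst hl
    simp at ha
  | cons x xs ih =>
    intro l hl a ha
    rw [List.splitOnP_cons] at hl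
    by_cases hx : p x = true
    · rw [if_pos hx] at hl
      rcases List.mem_cons.mp hl with h | h
      · subst h; simp at ha
      · exact ih l h a ha
    · rw [if_neg hx] at hl
      obtain ⟨h0, t, hsplit⟩ : ∃ h0 t, xs.splitOnP p = h0 :: t := by
        cases hE : xs.splitOnP p with
        | nil => exact absurd hE (List.splitOnP_ne_nil p xs)
        | cons a b => exact ⟨a, b, rfl⟩
      rw [hsplit, List.modifyHead] at hl
      rcases List.mem_cons.mp hl with h | h
      · subst h
        rcases List.mem_cons.mp ha with h | h
        · subst h; exact Bool.not_eq_true _ ▸ (by simpa using hx)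
        · exact ih h0 (by rw [hsplit]; exact List.mem_cons_self) a h
      · exact ih l (by rw [hsplit]; exact List.mem_cons_of_mem _ h) a ha

-- the mutual fresh/accumulate induction, fuelled by the number of raw lines
theorem pvMain (n : Nat) :
    (∀ lines : List (List Char), lines.length ≤ n → lines ≠ [] →
       (∀ l ∈ lines, '\n' ∉ l) → ∀ acc : List String,
         pvFinish ((PySem.Chars.join ['\n'] lines).foldl pvStepB (acc, [], 0, false))
           = acc ++ (pvOuterA lines).map String.mk)
  ∧ (∀ rest : List (List Char), rest.length ≤ n → rest ≠ [] →
       (∀ l ∈ rest, '\n' ∉ l) →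
       ∀ (acc : List String) (buf : List Char) (d : Int) (q : Bool), (d > 0 ∨ q = true) →
         pvFinish (('\n' :: PySem.Chars.join ['\n'] rest).foldl pvStepB (acc, buf, d, q))
           = acc ++ String.mk (buf ++ (pvTail d q rest).1)
               :: (pvOuterA (pvTail d q rest).2).map String.mk) := by
  induction n with
  | zero =>
    constructor
    · intro lines hlen hne _ _
      exact absurd (List.length_eq_zero_iff.mp (Nat.le_zero.mp hlen)) hne
    · intro rest hlen hne _ _ _ _ _ _
      exact absurd (List.length_eq_zero_iff.mp (Nat.le_zero.mp hlen)) hne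
  | succ n ih =>
    constructor
    · -- FRESH mode
      intro lines hlen hne hnl acc
      match lines with
      | l :: rs =>
        have hl : '\n' ∉ l := hnl l (List.mem_cons_self)
        cases rs with
        | nil =>
          rw [PySem.Chars.join_singleton, pvFold_line l hl]
          by_cases h : (pvBraceDepth l false).1 > 0 ∨ (pvBraceDepth l false).2 = true
          · simp [pvFinish, pvOuterA, pvAccA, PySem.Chars.join_singleton]
          · simp [pvFinish, pvOuterA, if_neg h]
        | cons r rs' =>
          rw [PySem.Chars.join_cons_cons, List.append_assoc, List.foldl_append,
              pvFold_line l hl]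
          simp only [List.nil_append, List.singleton_append, zero_add]
          by_cases h : (pvBraceDepth l false).1 > 0 ∨ (pvBraceDepth l false).2 = true
          · have hacc := ih.2 (r :: rs') (by simpa using Nat.le_of_succ_le_succ hlen)
              (by simp) (fun x hx => hnl x (List.mem_cons_of_mem _ hx)) acc l
              (pvBraceDepth l false).1 (pvBraceDepth l false).2 h
            rw [hacc]
            conv_rhs => rw [pvOuterA, if_pos h, pvAccA_eq _ _ _ _ (by simp),
              PySem.Chars.join_singleton]
            simp
          · rw [List.foldl_cons, pvStepB_nl_flush _ _ _ _ h]
            have hfresh := ih.1 (r :: rs') (by simpa using Nat.le_of_succ_le_succ hlen)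
              (by simp) (fun x hx => hnl x (List.mem_cons_of_mem _ hx))
              (acc ++ [String.mk l])
            rw [hfresh]
            conv_rhs => rw [pvOuterA, if_neg h]
            simp
    · -- ACC mode
      intro rest hlen hne hnl acc buf d q hdq
      match rest with
      | l :: rs =>
        have hl : '\n' ∉ l := hnl l (List.mem_cons_self)
        rw [List.foldl_cons, pvStepB_nl_keep _ _ _ _ hdq]
        cases rs with
        | nil =>
          rw [PySem.Chars.join_singleton, pvFold_line l hl]
          simp only [pvTail, if_pos hdq]
          simp [pvFinish, pvOuterA]
        | cons r rs' =>
          rw [PySem.Chars.join_cons_cons, List.append_assoc, List.foldl_append,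
              pvFold_line l hl]
          simp only [List.singleton_append]
          by_cases h : d + (pvBraceDepth l q).1 > 0 ∨ (pvBraceDepth l q).2 = true
          · have hacc := ih.2 (r :: rs') (by simpa using Nat.le_of_succ_le_succ hlen)
              (by simp) (fun x hx => hnl x (List.mem_cons_of_mem _ hx))
              acc (buf ++ '\n' :: l) (d + (pvBraceDepth l q).1) (pvBraceDepth l q).2 h
            rw [show buf ++ ['\n'] ++ l = buf ++ '\n' :: l by simp, hacc]
            simp only [pvTail, if_pos hdq, if_pos h]
            simp
          · rw [List.foldl_cons, pvStepB_nl_flush _ _ _ _ h]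
            have hfresh := ih.1 (r :: rs') (by simpa using Nat.le_of_succ_le_succ hlen)
              (by simp) (fun x hx => hnl x (List.mem_cons_of_mem _ hx))
              (acc ++ [String.mk (buf ++ ['\n'] ++ l)])
            rw [hfresh]
            simp only [pvTail, if_pos hdq, if_neg h]
            simp

-- ===== VERDICT (by name: the statement is the Claim_ definition above) =====
theorem split_logical_lines_py_spec : Claim_equal_split_logical_lines_py := by
  intro text _
  show split_logical_lines_py text = split_logical_lines_py_alt text
  simp only [split_logical_lines_py, split_logical_lines_py_alt]
  set stripped := (text.toList.reverse.dropWhile (· == '\n')).reverse with hs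
  set lines := stripped.splitOn '\n' with hlines
  have hjoin : ∀ ls : List (List Char), PySem.Chars.join ['\n'] ls = ['\n'].intercalate ls :=
    fun _ => rfl
  have hne : lines ≠ [] := by
    rw [hlines]; unfold List.splitOn; exact List.splitOnP_ne_nil _ _
  have hnl : ∀ l ∈ lines, '\n' ∉ l := by
    intro l hl hmem
    have h := pvSplitOnP_pieces (· == '\n') stripped l
      (by rw [hlines] at hl; unfold List.splitOn at hl; exact hl) '\n' hmem
    simp at h
  have hJ : PySem.Chars.join ['\n'] lines = stripped := by
    rw [hjoin, hlines]; exact List.intercalate_splitOn stripped '\n'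
  have main := (pvMain lines.length).1 lines le_rfl hne hnl []
  simp only [pvFinish, List.nil_append] at main
  rw [← hJ]
  exact main.symm
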